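-- pv_equiv track=rewrite | github.com/SoufianLa/hackerrankps | task_pairirng/run.py | taskOfPairing
-- ===== SOURCE A (Python) =====
-- def taskOfPairing(freq):
--     j = 1
--
--     total = 0
--     r_list = list()
--     for i in freq:
--         total += int(i / 2)
--         r = i % 2
--         if r > 0:
--             r_list.append(j)
--         j += 1
--
--     for i in range(0, len(r_list), 2):
--         chunk = r_list[i:i + 2]
--         if len(chunk) >= 2 and (chunk[1] - chunk[0] == 1):
--             total += 1
--     return total
-- ===== SOURCE B (Python) =====
-- def taskOfPairing(freq):
--     total = 0
--     open_pos = None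
--     for j, i in enumerate(freq, 1):
--         total += int(i / 2)
--         if i % 2:
--             if open_pos is None:
--                 open_pos = j
--             else:
--                 if j - open_pos == 1:
--                     total += 1
--                 open_pos = None
--     return total
-- ===== Notes on version B (the rewrite author's own statement) =====
-- stated objective: simpler
-- what changed: B fuses A's two passes into a single loop: instead of building the intermediate r_list of odd positions and then scanning it in chunks of two with range/slicing, B pairs odd-frequency positions online with one pending-position variable.
import Mathlib
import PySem

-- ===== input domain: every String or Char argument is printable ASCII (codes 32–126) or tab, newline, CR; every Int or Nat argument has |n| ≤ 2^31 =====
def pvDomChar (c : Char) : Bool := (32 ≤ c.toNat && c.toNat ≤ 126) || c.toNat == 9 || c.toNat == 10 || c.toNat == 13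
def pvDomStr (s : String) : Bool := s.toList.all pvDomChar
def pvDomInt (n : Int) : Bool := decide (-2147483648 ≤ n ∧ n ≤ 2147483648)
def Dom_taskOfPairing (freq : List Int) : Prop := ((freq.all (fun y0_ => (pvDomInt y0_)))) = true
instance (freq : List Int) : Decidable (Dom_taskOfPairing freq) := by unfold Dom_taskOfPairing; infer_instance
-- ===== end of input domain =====

-- B fuses A's two passes into one: it pairs odd-frequency positions online with a
-- pending-position option instead of building the intermediate r_list (objective: simpler).


-- ===== PORT A =====
-- first loop body: state (j, total, r_list); 'int(i / 2)' is truncating division (exact on |i| ≤ 2^31)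
def pairStepA (st : Int × Int × List Int) (i : Int) : Int × Int × List Int :=
  (st.1 + 1,
   st.2.1 + PySem.Int.truncdiv i 2,
   if PySem.Int.mod i 2 > 0 then st.2.2 ++ [st.1] else st.2.2)

-- second loop: for i in range(0, len(r_list), 2): chunk = r_list[i:i+2]; …
def pairLoopA (rl : List Int) (total : Int) : Int :=
  (PySem.List.pyRange 0 (PySem.List.len rl) 2).foldl
    (fun total i =>
      let chunk := PySem.List.slice rl (some i) (some (i + 2))
      if 2 ≤ chunk.length ∧ PySem.List.pyGetD chunk 1 0 - PySem.List.pyGetD chunk 0 0 = 1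
      then total + 1 else total)
    total

def taskOfPairing (freq : List Int) : Int :=
  let s := freq.foldl pairStepA (1, 0, ([] : List Int))
  pairLoopA s.2.2 s.2.1

-- ===== PORT B =====
-- single pass: state (j, total, open_pos); 'if i % 2:' is truthiness, i.e. i % 2 ≠ 0
def pairStepB (st : Int × Int × Option Int) (i : Int) : Int × Int × Option Int :=
  let total := st.2.1 + PySem.Int.truncdiv i 2
  if PySem.Int.mod i 2 ≠ 0 then
    match st.2.2 with
    | none => (st.1 + 1, total, some st.1)
    | some p => (st.1 + 1, if st.1 - p = 1 then total + 1 else total, none)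
  else (st.1 + 1, total, st.2.2)

def taskOfPairing_alt (freq : List Int) : Int :=
  (freq.foldl pairStepB (1, 0, (none : Option Int))).2.1

-- ===== PRECONDITION & SPEC =====
def Spec_taskOfPairing (freq : List Int) (out : Int) : Prop := out = taskOfPairing_alt freq
instance (freq : List Int) (out : Int) : Decidable (Spec_taskOfPairing freq out) := by unfold Spec_taskOfPairing; infer_instance

-- ===== CLAIM (what is proved, stated in full; the proofs are below) =====
def Claim_equal_taskOfPairing : Prop := ∀ (freq : List Int), Dom_taskOfPairing freq → Spec_taskOfPairing freq (taskOfPairing freq)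

-- ===== LEMMAS AND PROOFS =====

-- the 1-based positions of odd entries, starting at position j
def oddPos : List Int → Int → List Int
  | [], _ => []
  | i :: t, j => (if PySem.Int.mod i 2 > 0 then [j] else []) ++ oddPos t (j + 1)

-- sum of the truncating halves
def sumHalf : List Int → Int
  | [] => 0
  | i :: t => PySem.Int.truncdiv i 2 + sumHalf t

-- number of adjacent pairs when the list is chunked in twos
def pairCount : List Int → Int
  | a :: b :: t => (if b - a = 1 then 1 else 0) + pairCount t
  | _ => 0

theorem foldA_eq (freq : List Int) : ∀ (j total : Int) (rl : List Int),
    freq.foldl pairStepA (j, total, rl) =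
      (j + freq.length, total + sumHalf freq, rl ++ oddPos freq j) := by
  induction freq with
  | nil => intro j total rl; simp [sumHalf, oddPos]
  | cons i t ih =>
      intro j total rl
      simp only [List.foldl_cons, pairStepA, ih, Prod.mk.injEq]
      refine ⟨by simp; ring, by simp [sumHalf]; ring, ?_⟩
      simp only [oddPos]
      split <;> simp

theorem mod_two_cases (i : Int) : PySem.Int.mod i 2 = 0 ∨ PySem.Int.mod i 2 = 1 := by
  have h1 := PySem.Int.mod_nonneg i (b := 2) (by omega)
  have h2 := PySem.Int.mod_lt i (b := 2) (by omega)
  omega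

theorem foldB_eq (freq : List Int) : ∀ (j total : Int) (op : Option Int),
    (freq.foldl pairStepB (j, total, op)).2.1 =
      total + sumHalf freq + pairCount (op.toList ++ oddPos freq j) := by
  induction freq with
  | nil =>
      intro j total op
      cases op <;> simp [sumHalf, oddPos, pairCount]
  | cons i t ih =>
      intro j total op
      have hm0 : i % 2 = PySem.Int.mod i 2 :=
        (PySem.Int.mod_eq_emod_of_pos (a := i) (b := 2) (by omega)).symm
      rcases mod_two_cases i with hm | hm
      · -- even entry: open_pos unchanged
        have hm' : i % 2 = 0 := by rw [hm0, hm]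
        simp only [List.foldl_cons, pairStepB, hm]
        simp only [ne_eq, not_true_eq_false, reduceIte, ih]
        simp [oddPos, hm', sumHalf]
        ring
      · -- odd entry
        have hm' : i % 2 = 1 := by rw [hm0, hm]
        cases op with
        | none =>
            simp only [List.foldl_cons, pairStepB, hm]
            norm_num
            rw [ih]
            simp [oddPos, hm', sumHalf]; ring
        | some p =>
            simp only [List.foldl_cons, pairStepB, hm]
            norm_num
            rw [ih]
            simp only [oddPos, hm, Option.toList_none, List.nil_append]
            norm_num [pairCount, sumHalf]
            split <;> ring

-- A's range(0, len, 2) loop counts adjacent pairs chunk by chunk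
theorem chunkFold (n : Nat) : ∀ (rl : List Int), rl.length ≤ n → ∀ (total : Int),
    (List.range ((rl.length + 1) / 2)).foldl
      (fun tot m =>
        let chunk := (rl.drop (2 * m)).take 2
        if 2 ≤ chunk.length ∧ chunk.getD 1 0 - chunk.getD 0 0 = 1
        then tot + 1 else tot) total
    = total + pairCount rl := by
  induction n with
  | zero =>
      intro rl h total
      have : rl = [] := List.eq_nil_of_length_eq_zero (by omega)
      subst this; simp [pairCount]
  | succ n ih =>
      intro rl h total
      match rl with
      | [] => simp [pairCount]
      | [a] => simp [pairCount]
      | a :: b :: t =>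
          have hdiv : ((a :: b :: t).length + 1) / 2 = (t.length + 1) / 2 + 1 := by
            simp; omega
          rw [hdiv, List.range_succ_eq_map, List.foldl_cons, List.foldl_map]
          have hstep : (fun (tot : Int) (m : Nat) =>
                let chunk := ((a :: b :: t).drop (2 * (m + 1))).take 2
                if 2 ≤ chunk.length ∧ chunk.getD 1 0 - chunk.getD 0 0 = 1
                then tot + 1 else tot)
              = (fun (tot : Int) (m : Nat) =>
                let chunk := (t.drop (2 * m)).take 2
                if 2 ≤ chunk.length ∧ chunk.getD 1 0 - chunk.getD 0 0 = 1
                then tot + 1 else tot) := by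
            funext tot m
            have h2 : 2 * (m + 1) = 2 * m + 1 + 1 := by omega
            simp [h2]
          simp only [hstep]
          rw [ih t (by simp at h; omega)]
          simp only [Nat.mul_zero, List.drop_zero, pairCount]
          have hch : ((a :: b :: t).take 2) = [a, b] := by simp [List.take]
          simp only [hch]
          have hcond : (2 ≤ ([a, b] : List Int).length ∧
              ([a, b] : List Int).getD 1 0 - ([a, b] : List Int).getD 0 0 = 1) ↔ b - a = 1 := by
            simp [List.getD]
          simp only [hcond]
          split <;> ring

theorem pairLoopA_eq (rl : List Int) (total : Int) :
    pairLoopA rl total = total + pairCount rl := by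
  unfold pairLoopA
  rw [PySem.List.len_eq, PySem.List.pyRange_of_pos 0 (rl.length) (by omega), List.foldl_map]
  have hK : (if (0:Int) < (rl.length : Int)
        then (((rl.length : Int) - 0 + 2 - 1) / 2).toNat else 0)
      = (rl.length + 1) / 2 := by
    split <;> omega
  rw [hK]
  have hfun : (fun (tot : Int) (k : Nat) =>
        (fun (tot : Int) (i : Int) =>
          let chunk := PySem.List.slice rl (some i) (some (i + 2))
          if 2 ≤ chunk.length ∧ PySem.List.pyGetD chunk 1 0 - PySem.List.pyGetD chunk 0 0 = 1
          then tot + 1 else tot) tot (0 + 2 * (k : Int)))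
      = (fun (tot : Int) (m : Nat) =>
        let chunk := (rl.drop (2 * m)).take 2
        if 2 ≤ chunk.length ∧ chunk.getD 1 0 - chunk.getD 0 0 = 1
        then tot + 1 else tot) := by
    funext tot k
    have hs : PySem.List.slice rl (some (0 + 2 * (k : Int))) (some (0 + 2 * (k : Int) + 2))
        = (rl.drop (2 * k)).take 2 := by
      rw [PySem.List.slice_toNat rl (by positivity) (by positivity)]
      have h1 : ((0:Int) + 2 * (k : Int)).toNat = 2 * k := by omega
      have h2 : ((0:Int) + 2 * (k : Int) + 2).toNat = 2 * k + 2 := by omega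
      have h3 : 2 * k + 2 - 2 * k = 2 := by omega
      rw [h1, h2, h3]
    simp only [hs, PySem.List.pyGetD_ofNat']
  rw [hfun, chunkFold rl.length rl le_rfl]

-- ===== VERDICT (by name: the statement is the Claim_ definition above) =====
theorem taskOfPairing_spec : Claim_equal_taskOfPairing := by
  intro freq _
  unfold Spec_taskOfPairing taskOfPairing taskOfPairing_alt
  rw [foldA_eq freq 1 0 []]
  rw [foldB_eq freq 1 0 none]
  simp only [List.nil_append, Option.toList_none]
  rw [pairLoopA_eq]
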